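-- pv_equiv track=rewrite | github.com/ulipedrozo/IO-ONGSearchSystem | ColabNotebooks/Model_Enhanced - copia.py | expandir_texto_con_sinonimos
-- ===== SOURCE A (Python) =====
-- def expandir_texto_con_sinonimos(texto: str) -> str:
--     """Expande el texto con sinónimos del dominio"""
--     texto_expandido = texto.lower()
--
--     # Expansiones específicas del dominio
--     expansiones = {
--         'niños': 'niños infancia menores pequeños',
--         'ayuda': 'ayuda apoyo asistencia colaboración',
--         'educación': 'educación enseñanza formación aprendizaje',
--         'salud': 'salud bienestar atención médica sanidad',
--         'mujeres': 'mujeres femenino género mujer',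
--         'discapacidad': 'discapacidad capacidades diferentes inclusión',
--         'ancianos': 'ancianos adultos mayores tercera edad vejez',
--         'pobres': 'pobres vulnerables necesitados carenciados',
--         'medio ambiente': 'medio ambiente ecología naturaleza sostenibilidad'
--     }
--
--     for palabra, sinonimos in expansiones.items():
--         if palabra in texto_expandido:
--             texto_expandido = texto_expandido.replace(palabra, sinonimos)
--
--     return texto_expandido
-- ===== SOURCE B (Python) =====
-- def expandir_texto_con_sinonimos(texto: str) -> str:
--     """Expande el texto con sinónimos del dominio (single left-to-right pass)."""
--     claves = [
--         ('niños', 'niños infancia menores pequeños'),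
--         ('ayuda', 'ayuda apoyo asistencia colaboración'),
--         ('educación', 'educación enseñanza formación aprendizaje'),
--         ('salud', 'salud bienestar atención médica sanidad'),
--         ('mujeres', 'mujeres femenino género mujer'),
--         ('discapacidad', 'discapacidad capacidades diferentes inclusión'),
--         ('ancianos', 'ancianos adultos mayores tercera edad vejez'),
--         ('pobres', 'pobres vulnerables necesitados carenciados'),
--         ('medio ambiente', 'medio ambiente ecología naturaleza sostenibilidad')]
--     t = texto.lower()
--     partes = []
--     i = 0
--     n = len(t)
--     while i < n:
--         for palabra, sinonimos in claves:
--             if t.startswith(palabra, i):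
--                 partes.append(sinonimos)
--                 i += len(palabra)
--                 break
--         else:
--             partes.append(t[i])
--             i += 1
--     return ''.join(partes)
-- ===== Notes on version B (the rewrite author's own statement) =====
-- stated objective: alternative
-- what changed: A makes nine sequential full-text replace passes (one per dictionary keyword); B makes a single left-to-right scan of the lowered text, expanding the first keyword that matches at each position via the lookup table; Pre_ excludes texts containing one of seven keyword-overlap strings, on which A's cascading (order-of-dict-iteration-dependent) result and B's one-shot expansion are both defensible.
import Mathlib
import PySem

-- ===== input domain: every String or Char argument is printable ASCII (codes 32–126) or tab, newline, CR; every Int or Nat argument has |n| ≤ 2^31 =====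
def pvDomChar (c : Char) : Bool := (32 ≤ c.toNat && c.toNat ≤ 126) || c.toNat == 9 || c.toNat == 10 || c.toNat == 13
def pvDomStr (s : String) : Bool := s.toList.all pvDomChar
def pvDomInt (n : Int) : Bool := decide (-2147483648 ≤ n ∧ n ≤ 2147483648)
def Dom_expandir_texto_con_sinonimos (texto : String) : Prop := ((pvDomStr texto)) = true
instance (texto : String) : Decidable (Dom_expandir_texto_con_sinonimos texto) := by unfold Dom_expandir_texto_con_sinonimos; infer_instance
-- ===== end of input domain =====

-- B replaces A's nine sequential full-text replace passes by a single left-to-right scan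
-- driven by the same keyword table (objective: alternative, same asymptotic cost, one pass).
-- Pre_ excludes texts containing one of seven keyword-overlap strings, where A's value
-- depends on the dict's iteration order; equality is proved on all other texts.

-- ===== PORT A =====
def expandir_texto_con_sinonimos (texto : String) : String :=
  let texto_expandido := PySem.Str.lower texto
  let expansiones : PySem.Dict String String :=
    ((((((((PySem.Dict.empty.insert "niños" "niños infancia menores pequeños").insert
      "ayuda" "ayuda apoyo asistencia colaboración").insert
      "educación" "educación enseñanza formación aprendizaje").insert
      "salud" "salud bienestar atención médica sanidad").insert
      "mujeres" "mujeres femenino género mujer").insert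
      "discapacidad" "discapacidad capacidades diferentes inclusión").insert
      "ancianos" "ancianos adultos mayores tercera edad vejez").insert
      "pobres" "pobres vulnerables necesitados carenciados").insert
      "medio ambiente" "medio ambiente ecología naturaleza sostenibilidad"
  expansiones.items.foldl
    (fun te p => if PySem.Str.isIn p.1 te then PySem.Str.replace te p.1 p.2 else te)
    texto_expandido

-- ===== PORT B =====
def pvPairsB : List (String × String) :=
  [("niños", "niños infancia menores pequeños"),
   ("ayuda", "ayuda apoyo asistencia colaboración"),
   ("educación", "educación enseñanza formación aprendizaje"),
   ("salud", "salud bienestar atención médica sanidad"),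
   ("mujeres", "mujeres femenino género mujer"),
   ("discapacidad", "discapacidad capacidades diferentes inclusión"),
   ("ancianos", "ancianos adultos mayores tercera edad vejez"),
   ("pobres", "pobres vulnerables necesitados carenciados"),
   ("medio ambiente", "medio ambiente ecología naturaleza sostenibilidad")]


def scanB : List Char → List Char
  | [] => []
  | c :: rest =>
    match pvPairsB.find? (fun p => p.1.toList.isPrefixOf (c :: rest)) with
    | some p => p.2.toList ++ scanB (List.drop (p.1.toList.length - 1) rest)
    | none => c :: scanB rest
termination_by t => t.length
decreasing_by all_goals simp

def expandir_texto_con_sinonimos_alt (texto : String) : String :=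
  String.ofList (scanB (PySem.Str.lower texto).toList)

-- ===== PRECONDITION & SPEC =====
-- Pre_ excludes texts whose lowercase form contains one of the seven strings below, on
-- which two dictionary keywords overlap: there A's sequential replaces cascade (earlier
-- passes synthesize text that later keys re-expand, so the value depends on the dict's
-- iteration order) while B expands each original occurrence once left-to-right — both
-- values are defensible for such unspecified overlaps, so those texts are excluded
-- (on some of them the two results even coincide).
def pvContieneBajado (texto : String) (w : String) : Prop :=
  w.toList <:+: texto.toList.map Char.toLower

def Pre_expandir_texto_con_sinonimos (texto : String) : Prop :=
  ¬ (pvContieneBajado texto "ancianosalud" ∨ pvContieneBajado texto "educacióniños" ∨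
     pvContieneBajado texto "medio ambienteducación" ∨ pvContieneBajado texto "mujeresalud" ∨
     pvContieneBajado texto "niñosalud" ∨ pvContieneBajado texto "pobresalud" ∨
     pvContieneBajado texto "saludiscapacidad")

-- linear-scan decision procedure (the default `List.IsInfix` instance is quadratic)
instance (texto : String) : Decidable (Pre_expandir_texto_con_sinonimos texto) :=
  decidable_of_iff
    ((PySem.Chars.isIn "ancianosalud".toList (texto.toList.map Char.toLower) ||
      PySem.Chars.isIn "educacióniños".toList (texto.toList.map Char.toLower) ||
      PySem.Chars.isIn "medio ambienteducación".toList (texto.toList.map Char.toLower) ||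
      PySem.Chars.isIn "mujeresalud".toList (texto.toList.map Char.toLower) ||
      PySem.Chars.isIn "niñosalud".toList (texto.toList.map Char.toLower) ||
      PySem.Chars.isIn "pobresalud".toList (texto.toList.map Char.toLower) ||
      PySem.Chars.isIn "saludiscapacidad".toList (texto.toList.map Char.toLower)) = false)
    (by simp only [Bool.or_eq_false_iff, PySem.Chars.isIn_eq_false_iff,
      Pre_expandir_texto_con_sinonimos, pvContieneBajado, not_or, and_assoc])

def pvWitness_expandir_texto_con_sinonimos : String := "ayuda para la salud"

def Spec_expandir_texto_con_sinonimos (texto : String) (out : String) : Prop :=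
  out = expandir_texto_con_sinonimos_alt texto
instance (texto : String) (out : String) : Decidable (Spec_expandir_texto_con_sinonimos texto out) := by
  unfold Spec_expandir_texto_con_sinonimos; infer_instance

-- ===== CLAIM (what is proved, stated in full; the proofs are below) =====
def Claim_equal_expandir_texto_con_sinonimos : Prop :=
  ∀ (texto : String), Dom_expandir_texto_con_sinonimos texto →
    Pre_expandir_texto_con_sinonimos texto →
    Spec_expandir_texto_con_sinonimos texto (expandir_texto_con_sinonimos texto)

-- ===== LEMMAS AND PROOFS =====

def R (old new : List Char) : List Char → List Char
  | [] => []
  | c :: t =>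
    if old.isPrefixOf (c :: t) then new ++ R old new (List.drop (old.length - 1) t)
    else c :: R old new t
termination_by t => t.length
decreasing_by all_goals simp

theorem R_nil (old new : List Char) : R old new [] = [] := by simp [R]
theorem R_cons_pos (old new : List Char) (c : Char) (t : List Char)
    (h : old.isPrefixOf (c :: t) = true) :
    R old new (c :: t) = new ++ R old new (List.drop (old.length - 1) t) := by rw [R]; simp [h]
theorem R_cons_neg (old new : List Char) (c : Char) (t : List Char)
    (h : ¬ old.isPrefixOf (c :: t) = true) :
    R old new (c :: t) = c :: R old new t := by rw [R]; simp [h]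

theorem replace_go_eq (old new : List Char) (hold : old ≠ []) :
    ∀ fuel l acc, l.length ≤ fuel →
      PySem.Chars.replace.go old new fuel l acc = acc.reverse ++ R old new l := by
  intro fuel
  induction fuel with
  | zero =>
    intro l acc h
    have : l = [] := by cases l <;> simp_all
    subst this; simp [PySem.Chars.replace.go, R_nil]
  | succ n ih =>
    intro l acc h
    cases l with
    | nil => simp [PySem.Chars.replace.go, R_nil]
    | cons c t =>
      have ho : 1 ≤ old.length := by cases old with | nil => exact absurd rfl hold | cons a b => simp
      have ht : t.length ≤ n := by simpa using h
      rw [PySem.Chars.replace.go]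
      by_cases hp : old.isPrefixOf (c :: t) = true
      · simp only [hp, if_true]
        have hdrop : List.drop old.length (c :: t) = List.drop (old.length - 1) t := by
          obtain ⟨k, hk⟩ : ∃ k, old.length = k + 1 := ⟨old.length - 1, by omega⟩
          rw [hk]; simp
        have hlen : (List.drop old.length (c :: t)).length ≤ n := by
          rw [List.length_drop]; simp only [List.length_cons]; omega
        rw [ih _ _ hlen, R_cons_pos _ _ _ _ hp, hdrop]; simp
      · simp only [hp]
        rw [ih _ _ ht, R_cons_neg _ _ _ _ hp]; simp

theorem replace_eq_R (s old new : List Char) (hold : old ≠ []) :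
    PySem.Chars.replace s old new = R old new s := by
  rw [PySem.Chars.replace]
  simp only [List.isEmpty_iff]
  rw [if_neg hold]
  simpa using replace_go_eq old new hold s.length s [] le_rfl

theorem R_no_occ (old new : List Char) (hold : old ≠ []) :
    ∀ l, ¬ old <:+: l → R old new l = l := by
  intro l
  induction l with
  | nil => intro _; exact R_nil _ _
  | cons c t ih =>
    intro h
    have hp : ¬ old.isPrefixOf (c :: t) = true := by
      intro hp; exact h (List.IsPrefix.isInfix (List.isPrefixOf_iff_prefix.mp hp))
    rw [R_cons_neg _ _ _ _ hp, ih (fun hi => h (hi.trans (List.suffix_cons c t).isInfix))]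

theorem prefix_append_split_le {α : Type} {x a b : List α} (h : x <+: a ++ b)
    (hl : x.length ≤ a.length) : x <+: a := by
  have hx : x = (a ++ b).take x.length := by
    obtain ⟨u, hu⟩ := h
    rw [← hu]; simp
  rw [hx, List.take_append_of_le_length hl]
  exact List.take_prefix _ _

theorem prefix_append_split_ge {α : Type} {x a b : List α} (h : x <+: a ++ b)
    (hl : a.length ≤ x.length) : x = a ++ x.drop a.length ∧ x.drop a.length <+: b := by
  obtain ⟨u, hu⟩ := h
  have ha : a <+: x := by
    have : a <+: a ++ b := List.prefix_append a b
    obtain ⟨w, hw⟩ := this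
    -- a and x are both prefixes of a ++ b, and a is shorter
    exact List.prefix_of_prefix_length_le (List.prefix_append a b) ⟨u, hu⟩ hl
  obtain ⟨v, hv⟩ := ha
  have hxv : x.drop a.length = v := by rw [← hv]; simp
  constructor
  · rw [hxv, hv]
  · rw [hxv]
    have : a ++ (v ++ u) = a ++ b := by rw [← List.append_assoc, hv, hu]
    have hb : v ++ u = b := by simpa using this
    exact ⟨u, hb⟩

theorem suffix_eq_drop {α : Type} {x l : List α} (h : x <:+ l) :
    x = l.drop (l.length - x.length) := by
  obtain ⟨u, hu⟩ := h
  rw [← hu]; simp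


def PL : List (List Char × List Char) := pvPairsB.map (fun p => (p.1.toList, p.2.toList))

def SufKey (x : List Char) : Prop := ∃ p ∈ PL, ∃ m, x = p.1.drop m

theorem fact_key_ne_nil : ∀ p ∈ PL, p.1 ≠ [] := by decide
theorem fact_key_le_exp : ∀ p ∈ PL, ∀ q ∈ PL, p.1.length ≤ q.2.length := by decide
theorem fact_exp_starts_key : ∀ p ∈ PL, p.1.isPrefixOf p.2 = true := by decide
theorem fact_G : ∀ q ∈ PL, ∀ p ∈ PL, ∀ m, m < q.1.length + 1 →
    (p.1.isPrefixOf (q.1.drop m) = true) →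
    ((q.1.drop m).length ≤ p.1.length ∨
     ¬ ((q.1.drop m).drop p.1.length).isPrefixOf (p.2.drop p.1.length) = true) := by decide

theorem G_gen (ki rest : List Char) :
    ∀ t x, x.length ≤ ki.length + rest.length →
    (∀ x', x' <:+ x → ki <+: x' → x'.length ≤ ki.length ∨ ¬ (x'.drop ki.length <+: rest)) →
    x <+: R ki (ki ++ rest) t → x <+: t := by
  intro t
  induction t with
  | nil =>
    intro x _ _ hx
    rw [R_nil] at hx
    simpa [List.prefix_nil.mp hx] using List.nil_prefix
  | cons c t' ih =>
    intro x hlen H hx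
    by_cases hm : ki.isPrefixOf (c :: t') = true
    · rw [R_cons_pos _ _ _ _ hm, List.append_assoc] at hx
      by_cases hxs : x.length ≤ ki.length
      · exact (prefix_append_split_le hx hxs).trans (List.isPrefixOf_iff_prefix.mp hm)
      · obtain ⟨heq, hdrop⟩ := prefix_append_split_ge hx (by omega)
        have hki : ki <+: x := ⟨x.drop ki.length, heq.symm⟩
        rcases H x List.suffix_rfl hki with h | h
        · omega
        · exact absurd (prefix_append_split_le hdrop (by simp; omega)) h
    · rw [R_cons_neg _ _ _ _ hm] at hx
      cases x with
      | nil => exact List.nil_prefix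
      | cons d x' =>
        obtain ⟨hd, hx'⟩ := by
          rw [List.cons_prefix_cons] at hx; exact hx
        subst hd
        have := ih x' (by simp at hlen; omega)
          (fun x'' hs hk => H x'' (hs.trans (List.suffix_cons d x')) hk) hx'
        rw [List.cons_prefix_cons]
        exact ⟨rfl, this⟩

theorem G_key : ∀ p ∈ PL, ∀ t x, SufKey x → x <+: R p.1 p.2 t → x <+: t := by
  intro p hp t x hsk hx
  obtain ⟨q, hq, m, hm⟩ := hsk
  have hexp : p.2 = p.1 ++ p.2.drop p.1.length := by
    obtain ⟨v, hv⟩ := List.isPrefixOf_iff_prefix.mp (fact_exp_starts_key p hp)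
    rw [← hv]; simp
  apply G_gen p.1 (p.2.drop p.1.length) t x
  · have h1 : x.length ≤ q.1.length := by rw [hm]; simp
    have h2 : q.1.length ≤ p.2.length := fact_key_le_exp q hq p hp
    have : p.2.length = p.1.length + (p.2.drop p.1.length).length := by
      conv_lhs => rw [hexp]; simp
      simp
    omega
  · intro x' hs hk
    have hsq : x' <:+ q.1 := by
      rw [hm] at hs
      exact hs.trans (List.drop_suffix m q.1)
    have hx'eq : x' = q.1.drop (q.1.length - x'.length) := suffix_eq_drop hsq
    have := fact_G q hq p hp (q.1.length - x'.length) (by omega)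
      (by rw [← hx'eq]; exact List.isPrefixOf_iff_prefix.mpr hk)
    rcases this with h | h
    · left; rw [hx'eq]; exact h
    · right; intro hpre
      exact h (by rw [← hx'eq]; exact List.isPrefixOf_iff_prefix.mpr hpre)
  · rw [← hexp]; exact hx

def foldR (ps : List (List Char × List Char)) (t : List Char) : List Char :=
  ps.foldl (fun t p => R p.1 p.2 t) t

theorem foldR_nil (t : List Char) : foldR [] t = t := rfl
theorem foldR_cons (p : List Char × List Char) (ps : List (List Char × List Char)) (t : List Char) :
    foldR (p :: ps) t = foldR ps (R p.1 p.2 t) := rfl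
theorem foldR_append (ps qs : List (List Char × List Char)) (t : List Char) :
    foldR (ps ++ qs) t = foldR qs (foldR ps t) := by
  simp [foldR, List.foldl_append]

theorem G_foldR : ∀ ps, (∀ p ∈ ps, p ∈ PL) → ∀ t x, SufKey x → x <+: foldR ps t → x <+: t := by
  intro ps
  induction ps with
  | nil => intro _ t x _ hx; simpa [foldR_nil] using hx
  | cons p ps ih =>
    intro hmem t x hsk hx
    rw [foldR_cons] at hx
    exact G_key p (hmem p (List.mem_cons_self ..)) t x hsk
      (ih (fun q hq => hmem q (List.mem_cons_of_mem _ hq)) _ x hsk hx)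

def Pull (v t' : List Char) : Prop := ∀ x, SufKey x → x <+: t' → x <+: v

theorem Pull_refl (v : List Char) : Pull v v := fun _ _ h => h

theorem Pull_R (v t' : List Char) (p : List Char × List Char) (hp : p ∈ PL)
    (h : Pull v t') : Pull v (R p.1 p.2 t') :=
  fun x hsk hx => h x hsk (G_key p hp t' x hsk hx)

theorem R_append (old new a v : List Char)
    (h : ∀ q, q < a.length → ¬ old.isPrefixOf (a.drop q ++ v) = true) :
    R old new (a ++ v) = a ++ R old new v := by
  induction a with
  | nil => simp
  | cons c a' ih =>
    have h0 : ¬ old.isPrefixOf (c :: (a' ++ v)) = true := by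
      have := h 0 (by simp)
      simpa using this
    rw [List.cons_append, R_cons_neg _ _ _ _ h0,
      ih (fun q hq => by simpa using h (q + 1) (by simp; omega))]
    simp

theorem fold_block (v : List Char) :
    ∀ ps, (∀ p ∈ ps, p ∈ PL) → ∀ a t', Pull v t' →
    (∀ p ∈ ps, ∀ q < a.length, ∀ t'', Pull v t'' → ¬ p.1.isPrefixOf (a.drop q ++ t'') = true) →
    foldR ps (a ++ t') = a ++ foldR ps t' := by
  intro ps
  induction ps with
  | nil => intro _ a t' _ _; simp [foldR_nil]
  | cons p ps ih =>
    intro hmem a t' hpull hcond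
    rw [foldR_cons, R_append p.1 p.2 a t'
        (fun q hq => hcond p (List.mem_cons_self ..) q hq t' hpull),
      foldR_cons,
      ih (fun q hq => hmem q (List.mem_cons_of_mem _ hq)) a _
        (Pull_R v t' p (hmem p (List.mem_cons_self ..)) hpull)
        (fun p' hp' q hq t'' hp'' => hcond p' (List.mem_cons_of_mem _ hp') q hq t'' hp'')]


def pvTrigL : List (List Char) :=
  (["ancianosalud", "educacióniños", "medio ambienteducación", "mujeresalud",
    "niñosalud", "pobresalud", "saludiscapacidad"] : List String).map String.toList

theorem factNI : ∀ p ∈ PL, ∀ q ∈ PL, ¬ p.1 <:+: q.1.drop 1 := by decide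
theorem factE : ∀ pj ∈ PL, ∀ p ∈ PL, List.Sublist [pj, p] PL → ¬ p.1 <:+: pj.2 := by decide
theorem factT1 : ∀ p ∈ PL, ∀ pj ∈ PL, List.Sublist [p, pj] PL → ∀ q, 1 ≤ q → q < pj.1.length →
    (pj.1.drop q).isPrefixOf p.1 = true → pj.1.length - q < p.1.length →
    (pj.1 ++ p.1.drop (pj.1.length - q)) ∈ pvTrigL := by decide
theorem factT2 : ∀ pj ∈ PL, ∀ p ∈ PL, List.Sublist [pj, p] PL → ∀ q, 1 ≤ q → q < pj.2.length →
    (pj.2.drop q).isPrefixOf p.1 = true → pj.2.length - q < p.1.length →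
    (pj.1 ++ p.1.drop (pj.2.length - q)) ∈ pvTrigL := by decide


theorem scanB_nil : scanB [] = [] := by rw [scanB]

theorem scanB_cons_none (c : Char) (rest : List Char)
    (h : pvPairsB.find? (fun p => p.1.toList.isPrefixOf (c :: rest)) = none) :
    scanB (c :: rest) = c :: scanB rest := by
  rw [scanB, h]

theorem scanB_cons_some (c : Char) (rest : List Char) (p : String × String)
    (h : pvPairsB.find? (fun p => p.1.toList.isPrefixOf (c :: rest)) = some p) :
    scanB (c :: rest) = p.2.toList ++ scanB (List.drop (p.1.toList.length - 1) rest) := by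
  rw [scanB, h]

theorem foldR_nil_input : ∀ ps, foldR ps [] = [] := by
  intro ps
  induction ps with
  | nil => rfl
  | cons p ps ih => rw [foldR_cons, R_nil]; exact ih

theorem R_block (old new y : List Char) (hold : old ≠ []) :
    R old new (old ++ y) = new ++ R old new y := by
  cases old with
  | nil => exact absurd rfl hold
  | cons d o' =>
    rw [List.cons_append, R_cons_pos]
    · congr 1
      congr 1
      simp
    · exact List.isPrefixOf_iff_prefix.mpr ⟨y, by simp⟩

theorem Pull_foldR (v : List Char) (ps : List (List Char × List Char))
    (hps : ∀ p ∈ ps, p ∈ PL) : Pull v (foldR ps v) :=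
  fun x hsk hx => G_foldR ps hps v x hsk hx

theorem NoTrig_mono {s t : List Char} (h : t <:+ s) : (∀ T ∈ pvTrigL, ¬ T <:+: s) →
    (∀ T ∈ pvTrigL, ¬ T <:+: t) :=
  fun hn T hT hi => hn T hT (hi.trans h.isInfix)

theorem mem_PL_exists (p : List Char × List Char) (hp : p ∈ PL) :
    ∃ pb ∈ pvPairsB, p = (pb.1.toList, pb.2.toList) := by
  simp only [PL, List.mem_map] at hp
  obtain ⟨pb, hpb, hpe⟩ := hp
  exact ⟨pb, hpb, hpe.symm⟩

theorem prefix_drop_isInfix {x l : List Char} {q : Nat} (h : x <+: l.drop q) : x <:+: l :=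
  h.isInfix.trans (List.drop_suffix q l).isInfix

theorem hcond1 (s v : List Char) (pj p : List Char × List Char)
    (hpj : pj ∈ PL) (hp : p ∈ PL) (hord : List.Sublist [p, pj] PL)
    (hs : s = pj.1 ++ v)
    (hnp : ¬ p.1 <+: s)
    (hNT : ∀ T ∈ pvTrigL, ¬ T <:+: s) :
    ∀ q, q < pj.1.length → ∀ t'', Pull v t'' → ¬ p.1.isPrefixOf (pj.1.drop q ++ t'') = true := by
  intro q hq t'' hpull hpre
  have hx : p.1 <+: pj.1.drop q ++ t'' := List.isPrefixOf_iff_prefix.mp hpre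
  have ha : (pj.1.drop q).length = pj.1.length - q := by simp
  by_cases hxl : p.1.length ≤ (pj.1.drop q).length
  · have hxa : p.1 <+: pj.1.drop q := prefix_append_split_le hx hxl
    by_cases hq0 : q = 0
    · subst hq0
      simp only [List.drop_zero] at hxa
      exact hnp (by rw [hs]; exact hxa.trans (List.prefix_append pj.1 v))
    · have hdq : pj.1.drop q = (pj.1.drop 1).drop (q - 1) := by
        rw [List.drop_drop]; congr 1; omega
      rw [hdq] at hxa
      exact factNI p hp pj hpj (prefix_drop_isInfix hxa)
  · obtain ⟨heq, hw⟩ := prefix_append_split_ge hx (by omega)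
    have hwne : p.1.drop (pj.1.drop q).length ≠ [] := by
      intro hcon
      have := congrArg List.length hcon
      simp at this; omega
    have hwv : p.1.drop (pj.1.drop q).length <+: v :=
      hpull _ ⟨p, hp, (pj.1.drop q).length, rfl⟩ hw
    by_cases hq0 : q = 0
    · subst hq0
      simp only [List.drop_zero] at heq hwv
      refine hnp ?_
      rw [hs, heq]
      exact (List.prefix_append_right_inj pj.1).mpr hwv
    · have hpref : (pj.1.drop q).isPrefixOf p.1 = true :=
        List.isPrefixOf_iff_prefix.mpr ⟨p.1.drop (pj.1.drop q).length, heq.symm⟩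
      have hT : (pj.1 ++ p.1.drop (pj.1.length - q)) ∈ pvTrigL :=
        factT1 p hp pj hpj hord q (by omega) hq hpref (by omega)
      refine hNT _ hT ?_
      have : pj.1 ++ p.1.drop (pj.1.length - q) <+: s := by
        rw [hs, ← ha]
        exact (List.prefix_append_right_inj pj.1).mpr hwv
      exact this.isInfix

theorem hcond2 (s v : List Char) (pj p : List Char × List Char)
    (hpj : pj ∈ PL) (hp : p ∈ PL) (hord : List.Sublist [pj, p] PL)
    (hs : s = pj.1 ++ v)
    (hNT : ∀ T ∈ pvTrigL, ¬ T <:+: s) :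
    ∀ q, q < pj.2.length → ∀ t'', Pull v t'' → ¬ p.1.isPrefixOf (pj.2.drop q ++ t'') = true := by
  intro q hq t'' hpull hpre
  have hx : p.1 <+: pj.2.drop q ++ t'' := List.isPrefixOf_iff_prefix.mp hpre
  have ha : (pj.2.drop q).length = pj.2.length - q := by simp
  by_cases hxl : p.1.length ≤ (pj.2.drop q).length
  · exact factE pj hpj p hp hord (prefix_drop_isInfix (prefix_append_split_le hx hxl))
  · obtain ⟨heq, hw⟩ := prefix_append_split_ge hx (by omega)
    have hwv : p.1.drop (pj.2.drop q).length <+: v :=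
      hpull _ ⟨p, hp, (pj.2.drop q).length, rfl⟩ hw
    by_cases hq0 : q = 0
    · have := fact_key_le_exp p hp pj hpj
      omega
    · have hpref : (pj.2.drop q).isPrefixOf p.1 = true :=
        List.isPrefixOf_iff_prefix.mpr ⟨p.1.drop (pj.2.drop q).length, heq.symm⟩
      have hT : (pj.1 ++ p.1.drop (pj.2.length - q)) ∈ pvTrigL :=
        factT2 pj hpj p hp hord q (by omega) hq hpref (by omega)
      refine hNT _ hT ?_
      have : pj.1 ++ p.1.drop (pj.2.length - q) <+: s := by
        rw [hs, ← ha]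
        exact (List.prefix_append_right_inj pj.1).mpr hwv
      exact this.isInfix

theorem fold_eq_scan : ∀ n s, s.length ≤ n → (∀ T ∈ pvTrigL, ¬ T <:+: s) →
    foldR PL s = scanB s := by
  intro n
  induction n with
  | zero =>
    intro s hl _
    have : s = [] := by cases s <;> simp_all
    subst this
    rw [foldR_nil_input, scanB_nil]
  | succ n ih =>
    intro s hl hNT
    cases s with
    | nil => rw [foldR_nil_input, scanB_nil]
    | cons c rest =>
      cases hf : pvPairsB.find? (fun p => p.1.toList.isPrefixOf (c :: rest)) with
      | none =>
        rw [scanB_cons_none _ _ hf]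
        have hnone := List.find?_eq_none.mp hf
        have hblock : foldR PL ([c] ++ rest) = [c] ++ foldR PL rest := by
          apply fold_block rest PL (fun p hp => hp) [c] rest (Pull_refl rest)
          intro p hp q hq t'' hpull hpre
          have hq0 : q = 0 := by simpa using hq
          subst hq0
          simp only [List.drop_zero, List.singleton_append] at hpre
          have hx : p.1 <+: c :: t'' := List.isPrefixOf_iff_prefix.mp hpre
          cases hp1 : p.1 with
          | nil => exact fact_key_ne_nil p hp hp1
          | cons d x' =>
            rw [hp1, List.cons_prefix_cons] at hx
            obtain ⟨hd, hx'⟩ := hx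
            have hxr : x' <+: rest := hpull x' ⟨p, hp, 1, by rw [hp1]; rfl⟩ hx'
            obtain ⟨pb, hpb, hpe⟩ := mem_PL_exists p hp
            have hpc : pb.1.toList <+: c :: rest := by
              have hpc' : p.1 <+: c :: rest := by
                rw [hp1, List.cons_prefix_cons]; exact ⟨hd, hxr⟩
              rw [hpe] at hpc'; exact hpc'
            exact hnone pb hpb (List.isPrefixOf_iff_prefix.mpr hpc)
        calc foldR PL (c :: rest) = foldR PL ([c] ++ rest) := rfl
          _ = [c] ++ foldR PL rest := hblock
          _ = c :: scanB rest := by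
              rw [ih rest (by simpa using hl)
                (NoTrig_mono (List.suffix_cons c rest) hNT)]
              rfl
      | some pb =>
        rw [scanB_cons_some _ _ _ hf]
        obtain ⟨hpred, as, bs, hsplit, has⟩ := List.find?_eq_some_iff_append.mp hf
        have hkj : pb.1.toList <+: c :: rest := List.isPrefixOf_iff_prefix.mp hpred
        have hkne : pb.1.toList ≠ [] := by
          intro hcon
          exact fact_key_ne_nil (pb.1.toList, pb.2.toList)
            (by simp only [PL, List.mem_map]; exact ⟨pb, by rw [hsplit]; simp, rfl⟩) hcon
        obtain ⟨v, hv⟩ := hkj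
        have hs : c :: rest = pb.1.toList ++ v := hv.symm
        have hPLsplit : PL = as.map (fun p => (p.1.toList, p.2.toList)) ++
            (pb.1.toList, pb.2.toList) :: bs.map (fun p => (p.1.toList, p.2.toList)) := by
          simp only [PL, hsplit, List.map_append, List.map_cons]
        have hpjmem : (pb.1.toList, pb.2.toList) ∈ PL := by
          rw [hPLsplit]; exact List.mem_append_right _ (List.mem_cons_self ..)
        have hasmem : ∀ p ∈ as.map (fun p => (p.1.toList, p.2.toList)), p ∈ PL := by
          intro p hp; rw [hPLsplit]; exact List.mem_append_left _ hp
        have hbsmem : ∀ p ∈ bs.map (fun p => (p.1.toList, p.2.toList)), p ∈ PL := by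
          intro p hp; rw [hPLsplit]
          exact List.mem_append_right _ (List.mem_cons_of_mem _ hp)
        have hNT' : ∀ T ∈ pvTrigL, ¬ T <:+: (c :: rest) := hNT
        -- step 1
        have hstep1 : foldR (as.map (fun p => (p.1.toList, p.2.toList))) (pb.1.toList ++ v) =
            pb.1.toList ++ foldR (as.map (fun p => (p.1.toList, p.2.toList))) v := by
          apply fold_block v _ hasmem _ v (Pull_refl v)
          intro p hp q hq t'' hpull
          apply hcond1 (c :: rest) v (pb.1.toList, pb.2.toList) p hpjmem (hasmem p hp)
            ?_ hs ?_ hNT' q hq t'' hpull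
          · rw [hPLsplit]
            refine List.Sublist.append (List.singleton_sublist.mpr hp) ?_
            exact (List.nil_sublist _).cons₂ _
          · obtain ⟨pb', hpb', hpe'⟩ := by
              simp only [List.mem_map] at hp
              exact hp
            intro hcon
            have hb := has pb' hpb'
            simp only [Bool.not_eq_eq_eq_not, Bool.not_true] at hb
            have hcon' : pb'.1.toList <+: c :: rest := by
              have := hcon
              rw [← hpe'] at this
              exact this
            rw [List.isPrefixOf_iff_prefix.mpr hcon'] at hb
            exact Bool.true_eq_false.mp hb
        -- step 3
        have hstep3 : foldR (bs.map (fun p => (p.1.toList, p.2.toList)))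
              (pb.2.toList ++ R pb.1.toList pb.2.toList
                (foldR (as.map (fun p => (p.1.toList, p.2.toList))) v)) =
            pb.2.toList ++ foldR (bs.map (fun p => (p.1.toList, p.2.toList)))
              (R pb.1.toList pb.2.toList
                (foldR (as.map (fun p => (p.1.toList, p.2.toList))) v)) := by
          apply fold_block v _ hbsmem _ _
            (Pull_R v _ _ hpjmem (Pull_foldR v _ hasmem))
          intro p hp q hq t'' hpull
          apply hcond2 (c :: rest) v (pb.1.toList, pb.2.toList) p hpjmem (hbsmem p hp)
            ?_ hs hNT' q hq t'' hpull
          rw [hPLsplit]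
          exact List.Sublist.append (List.nil_sublist _)
            ((List.singleton_sublist.mpr hp).cons₂ _)
        have hkl : 1 ≤ pb.1.toList.length := by
          cases hcl : pb.1.toList with
          | nil => exact absurd hcl hkne
          | cons a b => simp
        have hvdrop : List.drop (pb.1.toList.length - 1) rest = v := by
          have h1 : v = List.drop pb.1.toList.length (pb.1.toList ++ v) := by simp
          rw [hv] at h1
          obtain ⟨k, hk⟩ : ∃ k, pb.1.toList.length = k + 1 := ⟨pb.1.toList.length - 1, by omega⟩
          rw [hk] at h1
          simp only [List.drop_succ_cons] at h1
          rw [hk]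
          simpa using h1.symm
        have hlen_v : v.length ≤ n := by
          have hlv := congrArg List.length hv
          simp only [List.length_append, List.length_cons] at hlv
          simp only [List.length_cons] at hl
          omega
        have hNT_v : ∀ T ∈ pvTrigL, ¬ T <:+: v :=
          NoTrig_mono ⟨pb.1.toList, hv⟩ hNT
        calc foldR PL (c :: rest)
            = foldR (as.map (fun p => (p.1.toList, p.2.toList)) ++
                (pb.1.toList, pb.2.toList) :: bs.map (fun p => (p.1.toList, p.2.toList)))
                (pb.1.toList ++ v) := by rw [← hPLsplit, ← hs]
          _ = foldR ((pb.1.toList, pb.2.toList) :: bs.map (fun p => (p.1.toList, p.2.toList)))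
                (foldR (as.map (fun p => (p.1.toList, p.2.toList))) (pb.1.toList ++ v)) :=
              foldR_append ..
          _ = foldR ((pb.1.toList, pb.2.toList) :: bs.map (fun p => (p.1.toList, p.2.toList)))
                (pb.1.toList ++ foldR (as.map (fun p => (p.1.toList, p.2.toList))) v) := by
              rw [hstep1]
          _ = foldR (bs.map (fun p => (p.1.toList, p.2.toList)))
                (R pb.1.toList pb.2.toList
                  (pb.1.toList ++ foldR (as.map (fun p => (p.1.toList, p.2.toList))) v)) :=
              foldR_cons ..
          _ = foldR (bs.map (fun p => (p.1.toList, p.2.toList)))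
                (pb.2.toList ++ R pb.1.toList pb.2.toList
                  (foldR (as.map (fun p => (p.1.toList, p.2.toList))) v)) := by
              rw [R_block _ _ _ hkne]
          _ = pb.2.toList ++ foldR (bs.map (fun p => (p.1.toList, p.2.toList)))
                (R pb.1.toList pb.2.toList
                  (foldR (as.map (fun p => (p.1.toList, p.2.toList))) v)) := hstep3
          _ = pb.2.toList ++ foldR PL v := by
              conv_rhs => rw [hPLsplit, foldR_append, foldR_cons]
          _ = pb.2.toList ++ scanB v := by rw [ih v hlen_v hNT_v]
          _ = pb.2.toList ++ scanB (List.drop (pb.1.toList.length - 1) rest) := by rw [hvdrop]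


theorem foldStr_eq_foldR : ∀ (l : List (String × String)) (s : String),
    (∀ p ∈ l, p.1.toList ≠ []) →
    (l.foldl (fun te p => if PySem.Str.isIn p.1 te then PySem.Str.replace te p.1 p.2 else te) s).toList
      = foldR (l.map (fun p => (p.1.toList, p.2.toList))) s.toList := by
  intro l
  induction l with
  | nil => intro s _; rfl
  | cons p l ih =>
    intro s hne
    have hpne : p.1.toList ≠ [] := hne p (List.mem_cons_self ..)
    simp only [List.foldl_cons, List.map_cons, foldR_cons]
    by_cases hin : PySem.Str.isIn p.1 s = true
    · rw [if_pos hin, ih _ (fun q hq => hne q (List.mem_cons_of_mem _ hq))]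
      congr 1
      rw [PySem.Str.toList_replace, replace_eq_R _ _ _ hpne]
    · rw [if_neg hin, ih _ (fun q hq => hne q (List.mem_cons_of_mem _ hq))]
      congr 1
      rw [R_no_occ _ _ hpne]
      rw [PySem.Str.isIn_eq] at hin
      exact (PySem.Chars.isIn_eq_false_iff _ _).mp (Bool.not_eq_true _ ▸ hin)

theorem items_eq : (((((((((PySem.Dict.empty.insert "niños" "niños infancia menores pequeños").insert
      "ayuda" "ayuda apoyo asistencia colaboración").insert
      "educación" "educación enseñanza formación aprendizaje").insert
      "salud" "salud bienestar atención médica sanidad").insert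
      "mujeres" "mujeres femenino género mujer").insert
      "discapacidad" "discapacidad capacidades diferentes inclusión").insert
      "ancianos" "ancianos adultos mayores tercera edad vejez").insert
      "pobres" "pobres vulnerables necesitados carenciados").insert
      "medio ambiente" "medio ambiente ecología naturaleza sostenibilidad" : PySem.Dict String String).items
    = pvPairsB := by decide

theorem portA_eq_foldR (texto : String) :
    (expandir_texto_con_sinonimos texto).toList
      = foldR PL (PySem.Str.lower texto).toList := by
  rw [expandir_texto_con_sinonimos]
  simp only [items_eq]
  exact foldStr_eq_foldR pvPairsB (PySem.Str.lower texto) (by decide)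

theorem portB_toList (texto : String) :
    (expandir_texto_con_sinonimos_alt texto).toList
      = scanB (PySem.Str.lower texto).toList := by
  rw [expandir_texto_con_sinonimos_alt]
  simp


theorem lowerChar_eq_toLower (c : Char) : PySem.Chars.lowerChar c = c.toLower := by
  rw [PySem.Chars.lowerChar, PySem.Chars.isupper, Char.toLower]
  by_cases h : c.val ≥ 'A'.val ∧ c.val ≤ 'Z'.val
  · have hZt : c.val.toNat ≤ 90 := UInt32.le_iff_toNat_le.mp h.2
    rw [if_pos (by simp only [Bool.and_eq_true, decide_eq_true_eq]; exact ⟨h.1, h.2⟩),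
      dif_pos h]
    have hvalid : (c.toNat + 32).isValidChar := by
      left
      show c.val.toNat + 32 < 55296
      omega
    apply Char.ext
    rw [Char.val_ofNat hvalid]
    show UInt32.ofNat (c.val.toNat + 32) = c.val + ('a'.val - 'A'.val)
    have h32 : ('a'.val - 'A'.val) = 32 := by decide
    rw [h32]
    apply UInt32.toNat_inj.mp
    have h1 : (UInt32.ofNat (c.val.toNat + 32)).toNat = (c.val.toNat + 32) % 2 ^ 32 := by
      simp
    have h2 : (c.val + 32).toNat = (c.val.toNat + (32 : UInt32).toNat) % 2 ^ 32 :=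
      UInt32.toNat_add c.val 32
    have h3 : (32 : UInt32).toNat = 32 := by decide
    rw [h1, h2, h3]
  · rw [if_neg, dif_neg h]
    intro hc
    simp only [Bool.and_eq_true, decide_eq_true_eq] at hc
    exact h ⟨hc.1, hc.2⟩

theorem lower_toList (texto : String) :
    (PySem.Str.lower texto).toList = texto.toList.map Char.toLower := by
  rw [PySem.Str.toList_lower, PySem.Chars.lower]
  exact List.map_congr_left (fun c _ => lowerChar_eq_toLower c)

theorem main_spec (texto : String) (hD : Pre_expandir_texto_con_sinonimos texto) :
    expandir_texto_con_sinonimos texto = expandir_texto_con_sinonimos_alt texto := by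
  rw [← String.toList_inj, portA_eq_foldR, portB_toList]
  apply fold_eq_scan (PySem.Str.lower texto).toList.length _ le_rfl
  intro T hT hinf
  rw [lower_toList] at hinf
  exfalso
  apply hD
  simp only [pvTrigL, List.map_cons, List.map_nil, List.mem_cons, List.not_mem_nil,
    or_false] at hT
  rcases hT with h | h | h | h | h | h | h
  · subst h; exact Or.inl hinf
  · subst h; exact Or.inr (Or.inl hinf)
  · subst h; exact Or.inr (Or.inr (Or.inl hinf))
  · subst h; exact Or.inr (Or.inr (Or.inr (Or.inl hinf)))
  · subst h; exact Or.inr (Or.inr (Or.inr (Or.inr (Or.inl hinf))))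
  · subst h; exact Or.inr (Or.inr (Or.inr (Or.inr (Or.inr (Or.inl hinf)))))
  · subst h; exact Or.inr (Or.inr (Or.inr (Or.inr (Or.inr (Or.inr hinf)))))

-- ===== VERDICT (by name: the statement is the Claim_ definition above) =====
theorem expandir_texto_con_sinonimos_spec : Claim_equal_expandir_texto_con_sinonimos := by
  intro texto _ hPre
  exact main_spec texto hPre
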